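-- pv_equiv track=rewrite | github.com/wf9a5m75/leetcode2 | 273.integer-to-english-words/solution.py | findScale
-- ===== SOURCE A (Python) =====
-- from typing import List, Union
--
-- def findScale(num: int) -> List[Union[int, str]]:
--
--     scaleRange = [
--        [100, "Hundred"], [1000, "Thousand"], [1000000, "Million"],  [1000000000, "Billion"]
--     ]
--     if (num >= scaleRange[-1][0]):
--         return scaleRange[-1]
--
--     L = 0
--     R = len(scaleRange) - 1
--     while(L < R):
--         mid = (L + R) >> 1
--         if (scaleRange[mid][0] <= num) and (num < scaleRange[mid + 1][0]):
--             return scaleRange[mid]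
--         elif (scaleRange[mid][0] < num):
--             L = mid + 1
--         else:
--             R = mid - 1
--     return scaleRange[L]
-- ===== SOURCE B (Python) =====
-- def findScale(num):
--     # Descending if-chain over the thresholds instead of binary search.
--     if num >= 1000000000:
--         return [1000000000, "Billion"]
--     if num >= 1000000:
--         return [1000000, "Million"]
--     if num >= 1000:
--         return [1000, "Thousand"]
--     return [100, "Hundred"]
-- ===== Notes on version B (the rewrite author's own statement) =====
-- stated objective: simpler
-- what changed: Replaced the binary search over the scale table with a plain descending if-chain of threshold comparisons.
import Mathlib
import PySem

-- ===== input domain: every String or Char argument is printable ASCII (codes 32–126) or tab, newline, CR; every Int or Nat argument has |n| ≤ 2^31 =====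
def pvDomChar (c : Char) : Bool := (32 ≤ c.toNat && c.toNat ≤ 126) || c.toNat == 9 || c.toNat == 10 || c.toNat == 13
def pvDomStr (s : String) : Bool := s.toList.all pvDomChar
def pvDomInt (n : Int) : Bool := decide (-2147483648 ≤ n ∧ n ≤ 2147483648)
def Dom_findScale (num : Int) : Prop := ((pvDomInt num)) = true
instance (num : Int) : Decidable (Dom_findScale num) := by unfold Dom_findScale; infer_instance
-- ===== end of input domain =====

-- B replaces A's binary search over the scale table by a plain descending if-chain (simpler).

-- ===== PORT A =====
-- the scaleRange table of A
def scaleRangeA : List (Int × String) :=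
  [(100, "Hundred"), (1000, "Thousand"), (1000000, "Million"), (1000000000, "Billion")]

-- scaleRange[i] (always in range in A's executions; default never reached)
def scaleGetA (i : Int) : Int × String :=
  (PySem.List.pyGet? scaleRangeA i).getD (0, "")

-- the while(L < R) loop of A, step for step; terminates because R - L shrinks
def findScaleLoopA (num L R : Int) : Int × String :=
  if h : L < R then
    let mid := PySem.Int.floordiv (L + R) 2   -- (L + R) >> 1 (arithmetic shift = floor division)
    if (scaleGetA mid).1 ≤ num ∧ num < (scaleGetA (mid + 1)).1 then
      scaleGetA mid
    else if (scaleGetA mid).1 < num then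
      findScaleLoopA num (mid + 1) R
    else
      findScaleLoopA num L (mid - 1)
  else
    scaleGetA L
termination_by (R - L).toNat
decreasing_by
  · have := PySem.Int.floordiv_two_mid_bounds (le_of_lt h)
    omega
  · have := PySem.Int.floordiv_two_mid_bounds (le_of_lt h)
    omega

def findScale (num : Int) : Int × String :=
  if (scaleGetA (-1)).1 ≤ num then scaleGetA (-1)
  else findScaleLoopA num 0 (scaleRangeA.length - 1)

-- ===== PORT B =====
def findScale_alt (num : Int) : Int × String :=
  if num ≥ 1000000000 then (1000000000, "Billion")
  else if num ≥ 1000000 then (1000000, "Million")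
  else if num ≥ 1000 then (1000, "Thousand")
  else (100, "Hundred")

-- ===== PRECONDITION & SPEC =====
def Spec_findScale (num : Int) (out : Int × String) : Prop := out = findScale_alt num
instance (num : Int) (out : Int × String) : Decidable (Spec_findScale num out) := by unfold Spec_findScale; infer_instance

-- ===== CLAIM (what is proved, stated in full; the proofs are below) =====
def Claim_equal_findScale : Prop := ∀ (num : Int), Dom_findScale num → Spec_findScale num (findScale num)

-- ===== LEMMAS AND PROOFS =====

theorem sgm1 : scaleGetA (-1) = (1000000000, "Billion") := by decide
theorem sg0 : scaleGetA 0 = (100, "Hundred") := by decide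
theorem sg1 : scaleGetA 1 = (1000, "Thousand") := by decide
theorem sg2 : scaleGetA 2 = (1000000, "Million") := by decide
theorem sg2p : scaleGetA (1 + 1) = (1000000, "Million") := by decide
theorem sg3p : scaleGetA (2 + 1) = (1000000000, "Billion") := by decide
theorem mid03 : PySem.Int.floordiv (0 + 3) 2 = 1 := by decide
theorem mid23 : PySem.Int.floordiv (1 + 1 + 3) 2 = 2 := by decide

-- num < 1000: the loop goes left once and returns scaleRange[0]
theorem loop_lo (num : Int) (h : num < 1000) : findScaleLoopA num 0 3 = (100, "Hundred") := by
  rw [findScaleLoopA]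
  simp only [mid03, sg1, sg2p]
  rw [dif_pos (by norm_num : (0:Int) < 3), if_neg (by simp; omega), if_neg (by simp; omega),
    findScaleLoopA]
  norm_num [sg0]

-- 1000 ≤ num < 10^6: the first midpoint test succeeds
theorem loop_mid (num : Int) (h1 : 1000 ≤ num) (h2 : num < 1000000) :
    findScaleLoopA num 0 3 = (1000, "Thousand") := by
  rw [findScaleLoopA]
  simp only [mid03, sg1, sg2p]
  rw [dif_pos (by norm_num : (0:Int) < 3), if_pos (⟨h1, h2⟩ : (1000:Int) ≤ num ∧ num < 1000000)]

-- 10^6 ≤ num < 10^9: the loop goes right once, then the midpoint test succeeds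
theorem loop_hi (num : Int) (h1 : 1000000 ≤ num) (h2 : num < 1000000000) :
    findScaleLoopA num 0 3 = (1000000, "Million") := by
  rw [findScaleLoopA]
  simp only [mid03, sg1, sg2p]
  rw [dif_pos (by norm_num : (0:Int) < 3),
    if_neg (fun c => absurd (c.2 : num < 1000000) (by omega)),
    if_pos (show (1000:Int) < num by omega), findScaleLoopA]
  simp only [mid23, sg2, sg3p]
  rw [dif_pos (by norm_num : (1+1 : Int) < 3), if_pos (⟨h1, h2⟩ : (1000000:Int) ≤ num ∧ num < 1000000000)]

-- ===== VERDICT (by name: the statement is the Claim_ definition above) =====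
theorem findScale_spec : Claim_equal_findScale := by
  intro num _
  unfold Spec_findScale findScale findScale_alt
  rw [sgm1]
  have hlen : (scaleRangeA.length : Int) - 1 = 3 := by decide
  rw [hlen]
  by_cases hb : (1000000000 : Int) ≤ num
  · rw [if_pos (by simpa using hb)]
    simp [hb]
  · rw [if_neg (by simpa using hb)]
    by_cases hm : (1000000 : Int) ≤ num
    · rw [loop_hi num hm (by omega)]; simp [hb, hm]
    · by_cases ht : (1000 : Int) ≤ num
      · rw [loop_mid num ht (by omega)]; simp [hb, hm, ht]
      · rw [loop_lo num (by omega)]; simp [hb, hm, ht]
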